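-- pv_equiv track=rewrite | github.com/Shalom-302/petrolieum | app/plugins/kyc/utils/security.py | validate_document_data
-- ===== SOURCE A (Python) =====
-- from typing import Dict, Any, Optional, List, Union
--
-- def validate_document_data(
--     document_type: str,
--     document_data: Dict[str, Any]
-- ) -> bool:
--     """
--     Validate submitted document data.
--
--     Args:
--         document_type: Type of document
--         document_data: Document data to validate
--
--     Returns:
--         True if document data is valid, False otherwise
--     """
--     # Basic validation for different document types
--     if not document_data:
--         return False
--
--     if document_type == "passport":
--         required_fields = ["passport_number", "issuing_country", "expiry_date"]
--     elif document_type == "national_id":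
--         required_fields = ["id_number", "issuing_authority"]
--     elif document_type == "drivers_license":
--         required_fields = ["license_number", "issuing_authority", "expiry_date"]
--     elif document_type == "utility_bill":
--         required_fields = ["service_provider", "issue_date", "customer_name"]
--     elif document_type == "third_party_reference":
--         required_fields = ["reference_name", "contact_information", "relationship"]
--     else:
--         # For other document types, require at least an ID and issuer
--         required_fields = ["document_id", "issuing_authority"]
--
--     # Check if all required fields are present
--     for field in required_fields:
--         if field not in document_data:
--             return False
--
--     # Additional validation for specific document types could be added here
--
--     return True
-- ===== SOURCE B (Python) =====
-- REQUIRED_FIELDS = {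
--     "passport": ["passport_number", "issuing_country", "expiry_date"],
--     "national_id": ["id_number", "issuing_authority"],
--     "drivers_license": ["license_number", "issuing_authority", "expiry_date"],
--     "utility_bill": ["service_provider", "issue_date", "customer_name"],
--     "third_party_reference": ["reference_name", "contact_information", "relationship"],
-- }
--
-- def validate_document_data(document_type, document_data):
--     # Invert A's traversal: instead of scanning the data once per required field,
--     # make ONE pass over the data's keys, shrinking the set of still-missing
--     # required fields; valid as soon as nothing is missing.
--     if not document_data:
--         return False
--     missing = set(REQUIRED_FIELDS.get(document_type, ["document_id", "issuing_authority"]))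
--     for key in document_data:
--         missing.discard(key)
--         if not missing:
--             return True
--     return False
-- ===== Notes on version B (the rewrite author's own statement) =====
-- stated objective: alternative
-- what changed: B inverts the traversal: instead of looping over the required fields and scanning the data for each (A), B makes one pass over the data's keys, shrinking a set of still-missing required fields, returning True as soon as it is empty; the if/elif chain becomes a table lookup.
import Mathlib
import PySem

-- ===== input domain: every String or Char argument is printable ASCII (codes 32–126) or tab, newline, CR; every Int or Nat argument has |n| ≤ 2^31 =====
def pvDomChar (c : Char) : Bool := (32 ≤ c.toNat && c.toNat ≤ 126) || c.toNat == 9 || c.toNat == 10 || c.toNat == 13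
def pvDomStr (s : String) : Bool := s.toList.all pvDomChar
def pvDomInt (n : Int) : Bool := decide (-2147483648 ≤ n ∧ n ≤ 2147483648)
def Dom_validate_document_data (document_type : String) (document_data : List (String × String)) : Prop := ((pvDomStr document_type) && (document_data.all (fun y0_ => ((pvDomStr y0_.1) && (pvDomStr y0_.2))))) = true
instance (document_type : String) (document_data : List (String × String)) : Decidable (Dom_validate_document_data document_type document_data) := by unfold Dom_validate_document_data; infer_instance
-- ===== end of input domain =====

-- B inverts A's traversal: one pass over the data's keys shrinking a set of still-missing
-- required fields (early True when empty), instead of A's loop over required fields each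
-- scanning the data; the if/elif chain becomes a table lookup. Return-value equivalence proved on all inputs.

-- ===== PORT A =====
-- A's loop: for field in required_fields: if field not in document_data: return False; then True
def pvALoop (required_fields : List String) (document_data : List (String × String)) : Bool :=
  match required_fields with
  | [] => true
  | field :: rest =>
    if !(document_data.any (fun kv => kv.1 == field)) then false
    else pvALoop rest document_data

def validate_document_data (document_type : String) (document_data : List (String × String)) : Bool :=
  if document_data.isEmpty then false
  else
    let required_fields :=
      if document_type == "passport" then ["passport_number", "issuing_country", "expiry_date"]
      else if document_type == "national_id" then ["id_number", "issuing_authority"]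
      else if document_type == "drivers_license" then ["license_number", "issuing_authority", "expiry_date"]
      else if document_type == "utility_bill" then ["service_provider", "issue_date", "customer_name"]
      else if document_type == "third_party_reference" then ["reference_name", "contact_information", "relationship"]
      else ["document_id", "issuing_authority"]
    pvALoop required_fields document_data

-- ===== PORT B =====
def pvRequiredFields : PySem.Dict String (List String) :=
  PySem.Dict.ofList
  [("passport", ["passport_number", "issuing_country", "expiry_date"]),
   ("national_id", ["id_number", "issuing_authority"]),
   ("drivers_license", ["license_number", "issuing_authority", "expiry_date"]),
   ("utility_bill", ["service_provider", "issue_date", "customer_name"]),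
   ("third_party_reference", ["reference_name", "contact_information", "relationship"])]

-- B's loop: for key in data: missing.discard(key); if not missing: return True; return False
def pvBLoop (missing : PySem.Set String) (keys : List String) : Bool :=
  match keys with
  | [] => false
  | k :: rest =>
    let missing' := PySem.Set.discard missing k
    if missing'.isEmpty then true
    else pvBLoop missing' rest

def validate_document_data_alt (document_type : String) (document_data : List (String × String)) : Bool :=
  if document_data.isEmpty then false
  else
    let missing := PySem.Set.ofList ((PySem.Dict.get? pvRequiredFields document_type).getD ["document_id", "issuing_authority"])
    pvBLoop missing (document_data.map Prod.fst)

-- ===== PRECONDITION & SPEC =====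
def Spec_validate_document_data (document_type : String) (document_data : List (String × String)) (out : Bool) : Prop := out = validate_document_data_alt document_type document_data
instance (document_type : String) (document_data : List (String × String)) (out : Bool) : Decidable (Spec_validate_document_data document_type document_data out) := by unfold Spec_validate_document_data; infer_instance

-- ===== CLAIM =====
def Claim_equal_validate_document_data : Prop := ∀ (document_type : String) (document_data : List (String × String)), Dom_validate_document_data document_type document_data → Spec_validate_document_data document_type document_data (validate_document_data document_type document_data)

-- ===== LEMMAS AND PROOFS =====

lemma any_key (d : List (String × String)) (f : String) :
    d.any (fun kv => kv.1 == f) = true ↔ f ∈ d.map Prod.fst := by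
  rw [List.any_eq_true]
  constructor
  · rintro ⟨kv, hkv, hbe⟩
    exact List.mem_map.2 ⟨kv, hkv, by simpa using hbe⟩
  · intro hmem
    rcases List.mem_map.1 hmem with ⟨kv, hkv, hfst⟩
    exact ⟨kv, hkv, by simp [hfst]⟩

lemma pvALoop_iff (fs : List String) (d : List (String × String)) :
    pvALoop fs d = true ↔ ∀ f ∈ fs, f ∈ d.map Prod.fst := by
  induction fs with
  | nil => simp [pvALoop]
  | cons f rest ih =>
    simp only [pvALoop]
    cases h : d.any (fun kv => kv.1 == f) with
    | false =>
      simp only [Bool.not_false, if_true, Bool.false_eq_true, false_iff]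
      intro hall
      have := (any_key d f).2 (hall f List.mem_cons_self)
      rw [h] at this
      exact absurd this (by simp)
    | true =>
      simp only [Bool.not_true, Bool.false_eq_true, if_false, ih]
      constructor
      · intro hr f' hf'
        rcases List.mem_cons.1 hf' with h1 | h2
        · exact h1 ▸ (any_key d f).1 h
        · exact hr f' h2
      · intro hall f' hf'
        exact hall f' (List.mem_cons_of_mem _ hf')

lemma filt_isEmpty (missing : List String) (k : String) :
    (missing.filter (fun x => !(x == k))).isEmpty = true ↔ ∀ f ∈ missing, f = k := by
  simp [List.isEmpty_iff, List.filter_eq_nil_iff]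

lemma pvBLoop_iff (keys : List String) (missing : List String) (hk : keys ≠ []) :
    pvBLoop missing keys = true ↔ ∀ f ∈ missing, f ∈ keys := by
  induction keys generalizing missing with
  | nil => exact absurd rfl hk
  | cons k rest ih =>
    simp only [pvBLoop, PySem.Set.discard]
    cases hE : (missing.filter (fun x => !(x == k))).isEmpty with
    | true =>
      have hall : ∀ f ∈ missing, f = k := (filt_isEmpty missing k).1 hE
      simp only [if_true, true_iff]
      intro f hf
      exact (hall f hf) ▸ List.mem_cons_self
    | false =>
      simp only [Bool.false_eq_true, if_false]
      cases rest with
      | nil =>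
        simp only [pvBLoop, Bool.false_eq_true, false_iff]
        intro hall
        have : (missing.filter (fun x => !(x == k))).isEmpty = true :=
          (filt_isEmpty missing k).2 (fun f hf => by simpa using hall f hf)
        rw [hE] at this
        exact absurd this (by simp)
      | cons k2 r2 =>
        rw [ih _ (List.cons_ne_nil _ _)]
        constructor
        · intro hall f hf
          by_cases hfk : f = k
          · exact hfk ▸ List.mem_cons_self
          · exact List.mem_cons_of_mem _
              (hall f (List.mem_filter.2 ⟨hf, by simp [hfk]⟩))
        · intro hall f hf
          have hm := List.mem_of_mem_filter hf
          have hne : ¬ f = k := by simpa using List.of_mem_filter hf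
          rcases List.mem_cons.1 (hall f hm) with h1 | h2
          · exact absurd h1 hne
          · exact h2

-- ===== VERDICT =====
theorem validate_document_data_spec : Claim_equal_validate_document_data := by
  intro dt dd _
  unfold Spec_validate_document_data validate_document_data validate_document_data_alt
  cases h : dd.isEmpty
  · simp only [Bool.false_eq_true, if_false]
    have hdd : dd ≠ [] := by simp_all
    have hkeys : dd.map Prod.fst ≠ [] := by simp [hdd]
    have hget : (PySem.Dict.get? pvRequiredFields dt).getD ["document_id", "issuing_authority"] =
        (if dt == "passport" then ["passport_number", "issuing_country", "expiry_date"]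
        else if dt == "national_id" then ["id_number", "issuing_authority"]
        else if dt == "drivers_license" then ["license_number", "issuing_authority", "expiry_date"]
        else if dt == "utility_bill" then ["service_provider", "issue_date", "customer_name"]
        else if dt == "third_party_reference" then ["reference_name", "contact_information", "relationship"]
        else ["document_id", "issuing_authority"]) := by
      have hpv : pvRequiredFields = PySem.Dict.mk
          [("passport", ["passport_number", "issuing_country", "expiry_date"]),
           ("national_id", ["id_number", "issuing_authority"]),
           ("drivers_license", ["license_number", "issuing_authority", "expiry_date"]),
           ("utility_bill", ["service_provider", "issue_date", "customer_name"]),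
           ("third_party_reference", ["reference_name", "contact_information", "relationship"])] := rfl
      rw [hpv]
      simp only [PySem.Dict.get?_mk_cons]
      split_ifs <;> simp_all [PySem.Dict.get?]
    rw [hget]
    apply Bool.eq_iff_iff.2
    rw [pvALoop_iff, pvBLoop_iff _ _ hkeys]
    constructor <;> intro hall f hf
    · exact hall f ((PySem.Set.mem_ofList _ _).1 hf)
    · exact hall f ((PySem.Set.mem_ofList _ _).2 hf)
  · simp
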